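-- pv_equiv track=rewrite | github.com/cns-iu/myaura | py_include/utils.py | addSpacesBetweenHashTags
-- ===== SOURCE A (Python) =====
-- def addSpacesBetweenHashTags(text):
--     if len(text) == 0:
--         return ''
--
--     # Add spaces if hashtags are togerther
--     new_text = ''
--     chars = set('#@')
--     for i, c in enumerate(text, start=0):
--         if (c in ['#', '@']) and (i > 0):
--             if text[i - 1] != ' ':
--                 new_text += ' '
--         new_text += c
--     return new_text
-- ===== SOURCE B (Python) =====
-- def addSpacesBetweenHashTags(text):
--     # Staged re-implementation: split into chunks, then join with conditional spacers.
--     # Phase 1: cut the text into chunks, each '#'/'@' opening a new chunk.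
--     chunks = ['']
--     for c in text:
--         if c in '#@':
--             chunks.append(c)
--         else:
--             chunks[-1] += c
--     # Phase 2: join the chunks, inserting ' ' before a chunk unless the text
--     # built so far is empty or already ends with a space.
--     out = chunks[0]
--     for ch in chunks[1:]:
--         if out and not out.endswith(' '):
--             out += ' '
--         out += ch
--     return out
-- ===== Notes on version B (the rewrite author's own statement) =====
-- stated objective: alternative
-- what changed: Replaced A's single indexed scan with lookback text[i-1] by two staged passes: first split the text into chunks with each '#'/'@' opening a new chunk, then join the chunks inserting a space before a chunk unless the text built so far is empty or ends with a space.
import Mathlib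
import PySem

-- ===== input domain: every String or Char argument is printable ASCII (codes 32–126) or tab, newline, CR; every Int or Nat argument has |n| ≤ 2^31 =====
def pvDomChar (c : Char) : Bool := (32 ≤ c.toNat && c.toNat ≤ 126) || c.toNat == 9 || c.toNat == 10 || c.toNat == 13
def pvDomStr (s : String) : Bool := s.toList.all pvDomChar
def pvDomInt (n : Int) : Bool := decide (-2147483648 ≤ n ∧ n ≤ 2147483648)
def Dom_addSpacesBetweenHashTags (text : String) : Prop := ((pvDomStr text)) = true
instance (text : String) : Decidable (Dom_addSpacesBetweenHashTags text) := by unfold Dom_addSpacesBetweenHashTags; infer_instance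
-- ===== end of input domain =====

-- B replaces A's single indexed scan with lookback by two staged passes (chunking
-- at '#'/'@', then joining with conditional spacers); same return value for every string.


-- ===== PORT A =====
-- literal transliteration of A: `if len == 0 return ''`, the unused set('#@'),
-- enumerate loop with lookback text[i-1]; the accumulated str is a List Char, mk'd at the end
def addSpacesBetweenHashTagsStep (text : String) (acc : List Char) (ic : Int × Char) : List Char :=
  let acc := if (ic.2 = '#' ∨ ic.2 = '@') ∧ ic.1 > 0 then
               (if PySem.Str.pyGet? text (ic.1 - 1) ≠ some ' ' then acc ++ [' '] else acc)
             else acc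
  acc ++ [ic.2]

def addSpacesBetweenHashTags (text : String) : String :=
  if PySem.Str.len text = 0 then "" else
    let _chars := PySem.Set.ofList ['#', '@']
    let newText := (PySem.List.enumerate text.toList 0).foldl
      (addSpacesBetweenHashTagsStep text) ([] : List Char)
    String.ofList newText

-- ===== PORT B =====
-- literal transliteration of Source B; strings are List Char.
-- `chunks[-1] += c` : append c to the last chunk
def pvAppendLast : List (List Char) → Char → List (List Char)
  | [], _ => []
  | [k], c => [k ++ [c]]
  | k :: ks, c => k :: pvAppendLast ks c

-- phase-1 loop body: `if c in '#@': chunks.append(c) else: chunks[-1] += c`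
def addSpacesBetweenHashTagsCut (ks : List (List Char)) (c : Char) : List (List Char) :=
  if c = '#' ∨ c = '@' then ks ++ [[c]] else pvAppendLast ks c

-- phase-2 loop body: `if out and not out.endswith(' '): out += ' '` then `out += ch`
-- (endswith(' ') on a one-char suffix is exactly `getLast? = some ' '`)
def addSpacesBetweenHashTagsJoinStep (out ch : List Char) : List Char :=
  (if out ≠ [] ∧ out.getLast? ≠ some ' ' then out ++ [' '] else out) ++ ch

def addSpacesBetweenHashTags_alt (text : String) : String :=
  let chunks := text.toList.foldl addSpacesBetweenHashTagsCut [[]]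
  String.ofList ((chunks.drop 1).foldl addSpacesBetweenHashTagsJoinStep (chunks.headD []))

-- ===== PRECONDITION & SPEC =====
def Spec_addSpacesBetweenHashTags (text : String) (out : String) : Prop := out = addSpacesBetweenHashTags_alt text
instance (text : String) (out : String) : Decidable (Spec_addSpacesBetweenHashTags text out) := by unfold Spec_addSpacesBetweenHashTags; infer_instance

-- ===== CLAIM (what is proved, stated in full; the proofs are below) =====
def Claim_equal_addSpacesBetweenHashTags : Prop := ∀ (text : String), Dom_addSpacesBetweenHashTags text → Spec_addSpacesBetweenHashTags text (addSpacesBetweenHashTags text)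

-- ===== LEMMAS AND PROOFS =====

-- common reference form: the output contribution of character c with predecessor p
def pvPiece (p c : Char) : List Char := if (c = '#' ∨ c = '@') ∧ p ≠ ' ' then [' ', c] else [c]

-- pairwise form of the whole output, predecessor carried along
def pvPF (p : Char) : List Char → List Char
  | [] => []
  | c :: rest => pvPiece p c ++ pvPF c rest

def pvPair : List Char → List Char
  | [] => []
  | c0 :: rest => c0 :: pvPF c0 rest

def pvJoin (ks : List (List Char)) : List Char :=
  (ks.drop 1).foldl addSpacesBetweenHashTagsJoinStep (ks.headD [])

-- ---- A = pairwise form ----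
theorem addSpacesBetweenHashTags_loop (text : String) (l : List Char) :
    ∀ (p : Char) (i : Int) (acc : List Char), 1 ≤ i →
      text.toList.drop (i.toNat - 1) = p :: l →
      (PySem.List.enumerate l i).foldl (addSpacesBetweenHashTagsStep text) acc =
        acc ++ pvPF p l := by
  induction l with
  | nil => intro p i acc _ _; simp [PySem.List.enumerate, pvPF]
  | cons c l ih =>
    intro p i acc hi hdrop
    rw [PySem.List.enumerate_cons, List.foldl_cons]
    have hstep : addSpacesBetweenHashTagsStep text acc (i, c) =
        acc ++ pvPiece p c := by
      have hget : PySem.Str.pyGet? text (i - 1) = some p := by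
        have h1 : i - 1 = ((i.toNat - 1 : Nat) : Int) := by omega
        rw [h1, PySem.Str.pyGet?_natCast]
        have := congrArg (fun xs => xs[0]?) hdrop
        simpa using this
      simp only [addSpacesBetweenHashTagsStep, pvPiece, hget]
      by_cases hc : c = '#' ∨ c = '@'
      · simp [hc, show i > 0 by omega]
        by_cases hp : p = ' ' <;> simp [hp]
      · simp [hc]
    rw [hstep]
    have hdrop' : text.toList.drop ((i + 1).toNat - 1) = c :: l := by
      have h2 : (i + 1).toNat - 1 = (i.toNat - 1) + 1 := by omega
      rw [h2, ← List.drop_drop, hdrop]; simp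
    rw [ih c (i + 1) _ (by omega) hdrop']
    simp [pvPF]

theorem a_eq_pair (text : String) :
    addSpacesBetweenHashTags text = String.ofList (pvPair text.toList) := by
  unfold addSpacesBetweenHashTags
  cases h : text.toList with
  | nil =>
    have hlen : PySem.Str.len text = 0 := by simp [PySem.Str.len_eq, h]
    rw [if_pos hlen]; simp [pvPair]
  | cons c0 rest =>
    have hlen : ¬ PySem.Str.len text = 0 := by simp [PySem.Str.len_eq, h]; omega
    rw [if_neg hlen]
    simp only [PySem.List.enumerate_cons, List.foldl_cons]
    have hstep0 : addSpacesBetweenHashTagsStep text [] (0, c0) = [c0] := by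
      simp [addSpacesBetweenHashTagsStep]
    rw [hstep0]
    rw [addSpacesBetweenHashTags_loop text rest c0 (0 + 1) [c0] (by omega)
      (by simpa using h)]
    simp [pvPair]

-- ---- facts about the pairwise form ----
theorem pvPiece_getLast? (p c : Char) : (pvPiece p c).getLast? = some c := by
  unfold pvPiece; split_ifs <;> simp

theorem pvGetLastD_cons (x p : Char) (l : List Char) :
    (x :: l).getLast?.getD p = l.getLast?.getD x := by
  cases hy : l.getLast? with
  | none =>
    have : l = [] := List.getLast?_eq_none_iff.mp hy
    simp [this]
  | some z =>
    have hl : l ≠ [] := by intro e; rw [e] at hy; simp at hy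
    cases l with
    | nil => exact absurd rfl hl
    | cons y ys => simp [List.getLast?_cons_cons, hy]

theorem pvPF_append (l : List Char) :
    ∀ p c, pvPF p (l ++ [c]) = pvPF p l ++ pvPiece (l.getLastD p) c := by
  induction l with
  | nil => intro p c; simp [pvPF]
  | cons x l ih =>
    intro p c
    simp [pvPF, ih x c]
    congr 1
    exact (pvGetLastD_cons x p l).symm

theorem pvPair_append (cs : List Char) (c : Char) :
    pvPair (cs ++ [c]) =
      pvPair cs ++ (if cs = [] then [c] else pvPiece (cs.getLastD ' ') c) := by
  cases cs with
  | nil => simp [pvPair, pvPF]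
  | cons c0 rest =>
    simp [pvPair, pvPF_append rest c0 c]
    congr 1
    exact (pvGetLastD_cons c0 ' ' rest).symm

theorem pvPair_eq_nil (cs : List Char) : pvPair cs = [] ↔ cs = [] := by
  cases cs <;> simp [pvPair]

theorem pvPair_getLast? (cs : List Char) : (pvPair cs).getLast? = cs.getLast? := by
  induction cs using List.reverseRecOn with
  | nil => simp [pvPair]
  | append_singleton cs c ih =>
    rw [pvPair_append]
    by_cases h : cs = []
    · simp [h, pvPair]
    · rw [if_neg h]
      have hpne : pvPiece (cs.getLastD ' ') c ≠ [] := by unfold pvPiece; split_ifs <;> simp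
      rw [List.getLast?_append_of_ne_nil _ hpne, pvPiece_getLast?]
      simp

-- ---- facts about B's two passes ----
theorem joinStep_snoc (out ch : List Char) (c : Char) :
    addSpacesBetweenHashTagsJoinStep out (ch ++ [c]) =
      addSpacesBetweenHashTagsJoinStep out ch ++ [c] := by
  simp [addSpacesBetweenHashTagsJoinStep]

theorem foldl_joinStep_appendLast (rest : List (List Char)) (c : Char) :
    ∀ out, rest ≠ [] →
      (pvAppendLast rest c).foldl addSpacesBetweenHashTagsJoinStep out =
        rest.foldl addSpacesBetweenHashTagsJoinStep out ++ [c] := by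
  induction rest with
  | nil => intro out h; exact absurd rfl h
  | cons k rest ih =>
    intro out _
    cases rest with
    | nil => simp [pvAppendLast, joinStep_snoc]
    | cons k2 rs =>
      rw [show pvAppendLast (k :: k2 :: rs) c = k :: pvAppendLast (k2 :: rs) c from rfl]
      rw [List.foldl_cons, ih _ (by simp)]
      rfl

theorem pvJoin_appendLast (ks : List (List Char)) (c : Char) (h : ks ≠ []) :
    pvJoin (pvAppendLast ks c) = pvJoin ks ++ [c] := by
  cases ks with
  | nil => exact absurd rfl h
  | cons k rest =>
    cases rest with
    | nil => simp [pvAppendLast, pvJoin]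
    | cons r rs =>
      rw [show pvAppendLast (k :: r :: rs) c = k :: pvAppendLast (r :: rs) c from rfl]
      unfold pvJoin
      simp only [List.drop_succ_cons, List.drop_zero, List.headD_cons]
      exact foldl_joinStep_appendLast (r :: rs) c k (by simp)

theorem chunks_ne_nil (cs : List Char) :
    ∀ ks : List (List Char), ks ≠ [] → cs.foldl addSpacesBetweenHashTagsCut ks ≠ [] := by
  induction cs with
  | nil => intro ks h; simpa
  | cons c cs ih =>
    intro ks h
    rw [List.foldl_cons]
    apply ih
    unfold addSpacesBetweenHashTagsCut
    split_ifs
    · simp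
    · cases ks with
      | nil => exact absurd rfl h
      | cons k rest => cases rest <;> simp [pvAppendLast]

theorem pvJoin_snoc_chunk (ks : List (List Char)) (c : Char) (h : ks ≠ []) :
    pvJoin (ks ++ [[c]]) = addSpacesBetweenHashTagsJoinStep (pvJoin ks) [c] := by
  cases ks with
  | nil => exact absurd rfl h
  | cons k rest => simp [pvJoin, List.foldl_append]

theorem b_join_chunks (cs : List Char) :
    pvJoin (cs.foldl addSpacesBetweenHashTagsCut [[]]) = pvPair cs := by
  induction cs using List.reverseRecOn with
  | nil => simp [pvJoin, pvPair]
  | append_singleton cs c ih =>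
    rw [List.foldl_append, List.foldl_cons, List.foldl_nil]
    have hne : cs.foldl addSpacesBetweenHashTagsCut [[]] ≠ [] :=
      chunks_ne_nil cs [[]] (by simp)
    by_cases hc : c = '#' ∨ c = '@'
    · rw [show addSpacesBetweenHashTagsCut (cs.foldl addSpacesBetweenHashTagsCut [[]]) c
            = cs.foldl addSpacesBetweenHashTagsCut [[]] ++ [[c]] from by
          unfold addSpacesBetweenHashTagsCut; rw [if_pos hc]]
      rw [pvJoin_snoc_chunk _ _ hne, ih]
      rw [pvPair_append]
      unfold addSpacesBetweenHashTagsJoinStep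
      by_cases h0 : cs = []
      · simp [h0, pvPair]
      · have hlast : (pvPair cs).getLast? = some (cs.getLast?.getD ' ') := by
          rw [pvPair_getLast?]
          cases hz : cs.getLast? with
          | none => exact absurd (List.getLast?_eq_none_iff.mp hz) h0
          | some z => simp
        have hne' : pvPair cs ≠ [] := by rw [ne_eq, pvPair_eq_nil]; exact h0
        rw [if_neg h0]
        unfold pvPiece
        simp only [List.getLastD_eq_getLast?]
        by_cases hsp : cs.getLast?.getD ' ' = ' '
        · rw [if_neg (by simp [hlast, hsp]), if_neg (by simp [hsp])]
        · rw [if_pos ⟨hne', by simp [hlast, hsp]⟩, if_pos ⟨hc, hsp⟩]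
          simp
    · rw [show addSpacesBetweenHashTagsCut (cs.foldl addSpacesBetweenHashTagsCut [[]]) c
            = pvAppendLast (cs.foldl addSpacesBetweenHashTagsCut [[]]) c from by
          unfold addSpacesBetweenHashTagsCut; rw [if_neg hc]]
      rw [pvJoin_appendLast _ _ hne, ih, pvPair_append]
      by_cases h0 : cs = [] <;> simp [h0, pvPiece, hc]

-- ===== VERDICT (by name: the statement is the Claim_ definition above) =====
theorem addSpacesBetweenHashTags_spec : Claim_equal_addSpacesBetweenHashTags := by
  unfold Claim_equal_addSpacesBetweenHashTags
  intro text _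
  unfold Spec_addSpacesBetweenHashTags
  rw [a_eq_pair]
  have hb : addSpacesBetweenHashTags_alt text
      = String.ofList (pvJoin (text.toList.foldl addSpacesBetweenHashTagsCut [[]])) := rfl
  rw [hb, b_join_chunks]
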